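-- pv_equiv track=rewrite | github.com/Oxford-CS/SensorActuatorNetwork-Lab1 | tree_routing.py | max_value_list
-- ===== SOURCE A (Python) =====
-- def max_value_list(li, interval, time):
--     max_val = 0
--     output = None
--     for item in li:
--         if max_val < item[0] and item[1] >= time - interval:
--             max_val = item[0]
--             output = item
--     return output
-- ===== SOURCE B (Python) =====
-- def max_value_list(li, interval, time):
--     candidates = [it for it in li if it[0] > 0 and it[1] >= time - interval]
--     if not candidates:
--         return None
--     best = max(v for v, _ in candidates)
--     return next(it for it in candidates if it[0] == best)
-- ===== Notes on version B (the rewrite author's own statement) =====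
-- stated objective: simpler
-- what changed: Replaced A's fused tracking loop (running max_val plus output variable) by three plain passes: a filter building the candidate list, max() over the values, and next() finding the first item with that value.
import Mathlib
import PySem

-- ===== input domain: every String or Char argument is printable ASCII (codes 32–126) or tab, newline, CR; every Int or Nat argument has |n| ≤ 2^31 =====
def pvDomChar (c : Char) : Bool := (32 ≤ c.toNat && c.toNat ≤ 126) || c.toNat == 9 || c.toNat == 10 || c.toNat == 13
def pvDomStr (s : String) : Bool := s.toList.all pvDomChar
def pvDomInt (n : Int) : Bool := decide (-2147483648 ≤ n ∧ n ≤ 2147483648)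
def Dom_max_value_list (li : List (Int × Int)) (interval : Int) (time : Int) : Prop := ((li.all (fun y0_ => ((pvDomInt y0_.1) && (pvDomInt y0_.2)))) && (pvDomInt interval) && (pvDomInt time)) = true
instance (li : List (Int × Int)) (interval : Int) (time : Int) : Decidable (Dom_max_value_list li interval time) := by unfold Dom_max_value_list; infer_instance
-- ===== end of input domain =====

-- B is a simpler three-pass decomposition (filter, max of values, first find) of A's fused tracking loop; same O(n) cost.

-- ===== PORT A =====
-- A's loop state: (max_val, output); one step of the for-loop body
def pvStep (interval time : Int) (st : Int × Option (Int × Int)) (item : Int × Int) : Int × Option (Int × Int) :=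
  if st.1 < item.1 ∧ time - interval ≤ item.2 then (item.1, some item) else st

def max_value_list (li : List (Int × Int)) (interval : Int) (time : Int) : Option (Int × Int) :=
  (li.foldl (pvStep interval time) ((0 : Int), (none : Option (Int × Int)))).2

-- ===== PORT B =====
-- 'max(v for v,_ in c)' is the running max of the values; 'next(it for it in c if it[0]==best)' is find?
def pvFirstMax (c : List (Int × Int)) : Option (Int × Int) :=
  match c with
  | [] => none
  | x :: t => (x :: t).find? (fun y => y.1 == (t.map Prod.fst).foldl max x.1)

def max_value_list_alt (li : List (Int × Int)) (interval : Int) (time : Int) : Option (Int × Int) :=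
  pvFirstMax (li.filter (fun y => decide ((0 : Int) < y.1) && decide (time - interval ≤ y.2)))

-- ===== PRECONDITION & SPEC =====
def Spec_max_value_list (li : List (Int × Int)) (interval : Int) (time : Int) (out : Option (Int × Int)) : Prop := out = max_value_list_alt li interval time
instance (li : List (Int × Int)) (interval : Int) (time : Int) (out : Option (Int × Int)) : Decidable (Spec_max_value_list li interval time out) := by unfold Spec_max_value_list; infer_instance

-- ===== CLAIM (what is proved, stated in full; the proofs are below) =====
def Claim_equal_max_value_list : Prop := ∀ (li : List (Int × Int)) (interval : Int) (time : Int), Dom_max_value_list li interval time → Spec_max_value_list li interval time (max_value_list li interval time)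

-- ===== LEMMAS AND PROOFS =====

-- find? over a value-threshold filter is find? over the whole list when the target value beats the threshold
lemma find_filter_gt (l : List (Int × Int)) (M v : Int) (h : v < M) :
    (l.filter (fun y => decide (v < y.1))).find? (fun y => y.1 == M)
      = l.find? (fun y => y.1 == M) := by
  induction l with
  | nil => rfl
  | cons a t ih =>
    by_cases ha : v < a.1
    · simp [List.filter_cons, ha, List.find?_cons, ih]
    · have : (a.1 == M) = false := by
        rw [beq_eq_false_iff_ne]
        omega
      simp [List.filter_cons, ha, List.find?_cons, this, ih]

-- the running max over a list of Ints: bounds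
lemma foldl_max_ge (t : List Int) (a : Int) :
    a ≤ t.foldl max a ∧ ∀ b ∈ t, b ≤ t.foldl max a := by
  induction t generalizing a with
  | nil => simp
  | cons c t ih =>
    obtain ⟨h1, h2⟩ := ih (max a c)
    refine ⟨le_trans (le_max_left a c) h1, ?_⟩
    intro b hb
    rw [List.mem_cons] at hb
    rcases hb with rfl | hb
    · exact le_trans (le_max_right a b) h1
    · exact h2 _ hb

-- the running max is attained
lemma foldl_max_attained (t : List Int) (a : Int) :
    t.foldl max a = a ∨ t.foldl max a ∈ t := by
  induction t generalizing a with
  | nil => simp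
  | cons c t ih =>
    simp only [List.foldl_cons]
    rcases ih (max a c) with h | h
    · rw [h]
      rcases max_choice a c with hm | hm
      · left; exact hm
      · right; rw [hm]; exact List.mem_cons_self
    · right; exact List.mem_cons_of_mem _ h

-- crux: first-max of (x :: c) is x unless some element of c strictly beats x, in
-- which case it is the first-max of the strictly-greater part of c
lemma pvFirstMax_cons (x : Int × Int) (c : List (Int × Int)) :
    pvFirstMax (x :: c)
      = match pvFirstMax (c.filter (fun y => decide (x.1 < y.1))) with
        | none => some x
        | some p => some p := by
  by_cases h : ∀ y ∈ c, y.1 ≤ x.1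
  · -- nothing beats x : the max is x.1 and x is found first
    have hle : (c.map Prod.fst).foldl max x.1 ≤ x.1 := by
      rcases foldl_max_attained (c.map Prod.fst) x.1 with he | he
      · omega
      · obtain ⟨y, hy, hey⟩ := List.mem_map.1 he
        have := h y hy
        omega
    have hM : (c.map Prod.fst).foldl max x.1 = x.1 :=
      le_antisymm hle (foldl_max_ge (c.map Prod.fst) x.1).1
    have hfil : c.filter (fun y => decide (x.1 < y.1)) = [] := by
      apply List.filter_eq_nil_iff.2
      intro y hy
      have := h y hy
      simp
      omega
    simp [pvFirstMax, hM, hfil, List.find?_cons]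
  · push_neg at h
    obtain ⟨w, hwmem, hw⟩ := h
    set M := (c.map Prod.fst).foldl max x.1 with hMdef
    have hbounds := foldl_max_ge (c.map Prod.fst) x.1
    have hwM : w.1 ≤ M := hbounds.2 _ (List.mem_map.2 ⟨w, hwmem, rfl⟩)
    have hxM : x.1 < M := lt_of_lt_of_le hw hwM
    -- LHS: x itself fails the test, search continues in c
    have hxfail : (x.1 == M) = false := by
      rw [beq_eq_false_iff_ne]; omega
    -- the strictly-greater part is nonempty
    have hwfil : w ∈ c.filter (fun y => decide (x.1 < y.1)) :=
      List.mem_filter.2 ⟨hwmem, by simpa using hw⟩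
    obtain ⟨h₂, t₂, hc₂⟩ : ∃ h₂ t₂, c.filter (fun y => decide (x.1 < y.1)) = h₂ :: t₂ := by
      cases hfc : c.filter (fun y => decide (x.1 < y.1)) with
      | nil => rw [hfc] at hwfil; cases hwfil
      | cons a b => exact ⟨a, b, rfl⟩
    set M₂ := (t₂.map Prod.fst).foldl max h₂.1 with hM₂def
    have hbounds₂ := foldl_max_ge (t₂.map Prod.fst) h₂.1
    have hmem₂ : ∀ z ∈ h₂ :: t₂, z ∈ c ∧ x.1 < z.1 := by
      intro z hz
      rw [← hc₂] at hz
      have := List.mem_filter.1 hz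
      exact ⟨this.1, by simpa using this.2⟩
    -- M₂ ≤ M
    have h₂₁ : M₂ ≤ M := by
      rcases foldl_max_attained (t₂.map Prod.fst) h₂.1 with he | he
      · have := (hmem₂ h₂ (List.mem_cons_self)).1
        have := hbounds.2 h₂.1 (List.mem_map.2 ⟨h₂, this, rfl⟩)
        omega
      · obtain ⟨z, hz, hez⟩ := List.mem_map.1 he
        have hzc := (hmem₂ z (List.mem_cons_of_mem _ hz)).1
        have := hbounds.2 z.1 (List.mem_map.2 ⟨z, hzc, rfl⟩)
        omega
    -- M ≤ M₂ : the attainer of M lies in the filtered list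
    have h₁₂ : M ≤ M₂ := by
      rcases foldl_max_attained (c.map Prod.fst) x.1 with he | he
      · omega
      · obtain ⟨z, hz, hez⟩ := List.mem_map.1 he
        have hzfil : z ∈ h₂ :: t₂ := by
          rw [← hc₂]
          exact List.mem_filter.2 ⟨hz, by simp; omega⟩
        rw [List.mem_cons] at hzfil
        rcases hzfil with rfl | hzt
        · have := hbounds₂.1
          omega
        · have := hbounds₂.2 z.1 (List.mem_map.2 ⟨z, hzt, rfl⟩)
          omega
    have hMM : M₂ = M := le_antisymm h₂₁ h₁₂
    -- find? over the filtered list = find? over c (target M > x.1)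
    have hff := find_filter_gt c M x.1 hxM
    rw [hc₂] at hff
    -- find? succeeds on h₂ :: t₂ : M₂ is attained there
    have hattain : ∃ z ∈ h₂ :: t₂, z.1 = M₂ := by
      rcases foldl_max_attained (t₂.map Prod.fst) h₂.1 with he | he
      · exact ⟨h₂, List.mem_cons_self, he.symm⟩
      · obtain ⟨z, hz, hez⟩ := List.mem_map.1 he
        exact ⟨z, List.mem_cons_of_mem _ hz, hez⟩
    have hsome : ∃ p, (h₂ :: t₂).find? (fun y => y.1 == M₂) = some p := by
      cases hf : (h₂ :: t₂).find? (fun y => y.1 == M₂) with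
      | some p => exact ⟨p, rfl⟩
      | none =>
        obtain ⟨z, hz, hez⟩ := hattain
        have := List.find?_eq_none.1 hf z hz
        simp [hez] at this
    obtain ⟨p, hp⟩ := hsome
    have hL : pvFirstMax (x :: c) = c.find? (fun y => y.1 == M) := by
      show (x :: c).find? (fun y => y.1 == (c.map Prod.fst).foldl max x.1) = _
      rw [← hMdef]
      simp [List.find?_cons, hxfail]
    have hR : pvFirstMax (h₂ :: t₂) = (h₂ :: t₂).find? (fun y => y.1 == M₂) := by
      show (h₂ :: t₂).find? (fun y => y.1 == (t₂.map Prod.fst).foldl max h₂.1) = _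
      rw [← hM₂def]
    rw [hL, hc₂, hR, hp]
    rw [← hff, ← hMM]
    exact hp

-- A's loop ignores the incoming output o unless no later item updates it
lemma loop_output (li : List (Int × Int)) (interval time m : Int) (o : Option (Int × Int)) :
    (li.foldl (pvStep interval time) (m, o)).2
      = match (li.foldl (pvStep interval time) (m, none)).2 with
        | none => o
        | some p => some p := by
  induction li generalizing m o with
  | nil => simp
  | cons x t ih =>
    simp only [List.foldl_cons, pvStep]
    split_ifs with hc
    · rw [ih x.1 (some x)]
      cases hr : (t.foldl (pvStep interval time) (x.1, none)).2 with
      | none => rfl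
      | some p => rfl
    · rw [ih m o]

-- main invariant: A's loop from threshold m computes B's first-max of the m-filtered list
lemma loop_eq_firstMax (li : List (Int × Int)) (interval time m : Int) :
    (li.foldl (pvStep interval time) (m, (none : Option (Int × Int)))).2
      = pvFirstMax (li.filter (fun y => decide (m < y.1) && decide (time - interval ≤ y.2))) := by
  induction li generalizing m with
  | nil => rfl
  | cons x t ih =>
    simp only [List.foldl_cons, pvStep]
    by_cases hc : m < x.1 ∧ time - interval ≤ x.2
    · have hb : (decide (m < x.1) && decide (time - interval ≤ x.2)) = true := by
        simp [hc.1, hc.2]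
      rw [if_pos hc, List.filter_cons_of_pos (by simpa using hb)]
      rw [loop_output t interval time x.1 (some x), ih x.1]
      have hcomm : t.filter (fun y => decide (x.1 < y.1) && decide (time - interval ≤ y.2))
          = (t.filter (fun y => decide (m < y.1) && decide (time - interval ≤ y.2))).filter
              (fun y => decide (x.1 < y.1)) := by
        rw [List.filter_filter]
        apply List.filter_congr
        intro y _
        by_cases h1 : x.1 < y.1
        · have h2 : m < y.1 := by omega
          simp [h1, h2]
        · simp [h1]
      rw [hcomm, pvFirstMax_cons x]
    · have hb : (decide (m < x.1) && decide (time - interval ≤ x.2)) = false := by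
        rcases not_and_or.1 hc with h | h <;> simp [h]
      rw [if_neg hc, List.filter_cons_of_neg (by simp at hb ⊢; tauto)]
      exact ih m

-- ===== VERDICT (by name: the statement is the Claim_ definition above) =====
theorem max_value_list_spec : Claim_equal_max_value_list := by
  intro li interval time _
  show max_value_list li interval time = max_value_list_alt li interval time
  unfold max_value_list max_value_list_alt
  exact loop_eq_firstMax li interval time 0
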